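-- pv_equiv track=rewrite | github.com/daeun503/TIL | programmers/level2/땅따먹기.py | solution
-- ===== SOURCE A (Python) =====
-- def solution(land):
--     N = len(land)
--
--     # 하향식
--     m = [land[0]] + [[0]*4 for i in range(N-1)]    # [N-1][4] 배열
--     for i in range(1, N):
--         m[i][0] = land[i][0] + max(m[i-1][1], m[i-1][2], m[i-1][3])
--         m[i][1] = land[i][1] + max(m[i-1][0], m[i-1][2], m[i-1][3])
--         m[i][2] = land[i][2] + max(m[i-1][0], m[i-1][1], m[i-1][3])
--         m[i][3] = land[i][3] + max(m[i-1][0], m[i-1][1], m[i-1][2])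
--     return max(m[N-1])
--
--     '''# 상향식 (이 더 빠름)
--     m = [[0]*4 for i in range(N-1)] + [land[N-1]]   # [N-1][4] 배열
--     for i in range(N-2, -1, -1):
--         m[i][0] = land[i][0] + max(m[i+1][1], m[i+1][2], m[i+1][3])
--         m[i][1] = land[i][1] + max(m[i+1][0], m[i+1][2], m[i+1][3])
--         m[i][2] = land[i][2] + max(m[i+1][0], m[i+1][1], m[i+1][3])
--         m[i][3] = land[i][3] + max(m[i+1][0], m[i+1][1], m[i+1][2])
--     return max(m[0])'''
-- ===== SOURCE B (Python) =====
-- def solution(land):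
--     # Divide and conquer over rows with max-plus "matrix" combination:
--     # mat(rows)[j][k] = best sum of a path through the block entering at
--     # column j of its first row and leaving at column k of its last row
--     # (None where impossible); blocks merge over a middle column change.
--     def mat(rows):
--         if len(rows) == 1:
--             r = rows[0]
--             return [[r[j] if j == k else None for k in range(4)] for j in range(4)]
--         mid = len(rows) // 2
--         X, Y = mat(rows[:mid]), mat(rows[mid:])
--         return [[max((X[j][k] + Y[kk][l]
--                       for k in range(4) for kk in range(4)
--                       if k != kk and X[j][k] is not None and Y[kk][l] is not None),
--                      default=None)
--                  for l in range(4)] for j in range(4)]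
--     M = mat(land)
--     return max(v for row in M for v in row if v is not None)
-- ===== Notes on version B (the rewrite author's own statement) =====
-- stated objective: alternative
-- what changed: Replaces the row-by-row DP recurrence with a divide-and-conquer over rows that computes, for each block, a 4x4 max-plus matrix of best path sums per (entry column, exit column) and merges halves over a column change; the answer is the max finite entry of the whole grid's matrix.
-- outside the precondition, e.g. on solution([[1, 2]]): A returns 2, B raises IndexError; on solution([[0, 0, 0, 0, 9]]): A returns 9, B returns 0
import Mathlib
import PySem

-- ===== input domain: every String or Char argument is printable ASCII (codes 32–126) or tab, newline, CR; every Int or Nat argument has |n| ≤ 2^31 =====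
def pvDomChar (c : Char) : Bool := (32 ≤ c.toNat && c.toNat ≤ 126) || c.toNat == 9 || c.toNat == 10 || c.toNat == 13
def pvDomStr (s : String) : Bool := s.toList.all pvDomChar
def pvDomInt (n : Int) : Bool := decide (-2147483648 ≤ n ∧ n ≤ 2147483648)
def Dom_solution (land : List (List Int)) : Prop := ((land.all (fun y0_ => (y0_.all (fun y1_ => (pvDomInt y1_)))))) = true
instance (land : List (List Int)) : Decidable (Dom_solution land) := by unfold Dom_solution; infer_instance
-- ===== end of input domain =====

-- B replaces A's forward row-by-row DP table with a divide-and-conquer over rows that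
-- combines 4x4 max-plus matrices of best (entry column, exit column) path sums
-- (objective: alternative algorithm, same asymptotic cost).

-- ===== PORT A =====
-- max(x, y, z) on ints (value of Python's 3-argument max)
def max3 (a b c : Int) : Int := max a (max b c)
-- max(xs) on a list of ints; default only taken where Python raises (outside Pre_)
def pymax (xs : List Int) : Int := (PySem.List.max? xs (fun y => y)).getD 0
-- xs[j] for the in-range indices the programs use (out of range = IndexError, excluded by Pre_)
def rowGet (xs : List Int) (j : Int) : Int := PySem.List.pyGetD xs j 0
-- the four elementwise assignments m[i][0..3] read only m[i-1], so they are written as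
-- one replacement of the (fresh zero) row m[i] by this 4-list
def stepA (prev row : List Int) : List Int :=
  [ rowGet row 0 + max3 (rowGet prev 1) (rowGet prev 2) (rowGet prev 3),
    rowGet row 1 + max3 (rowGet prev 0) (rowGet prev 2) (rowGet prev 3),
    rowGet row 2 + max3 (rowGet prev 0) (rowGet prev 1) (rowGet prev 3),
    rowGet row 3 + max3 (rowGet prev 0) (rowGet prev 1) (rowGet prev 2) ]

def solution (land : List (List Int)) : Int :=
  let N : Int := (land.length : Int)
  let m0 : List (List Int) :=
    [PySem.List.pyGetD land 0 []] ++ (PySem.List.pyRange 0 (N - 1) 1).map (fun _ => [0, 0, 0, 0])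
  let m := (PySem.List.pyRange 1 N 1).foldl
    (fun m i =>
      PySem.List.pySetD m i (stepA (PySem.List.pyGetD m (i - 1) []) (PySem.List.pyGetD land i [])))
    m0
  pymax (PySem.List.pyGetD m (N - 1) [])

-- ===== PORT B =====
-- X[j][k] + Y[kk][l] guarded by the two 'is not None' tests of the generator
def oadd : Option Int → Option Int → Option Int
  | some a, some b => some (a + b)
  | _, _ => none
-- max(<ints>, default=None)
def maxD (l : List Int) : Option Int :=
  match l with
  | [] => none
  | h :: t => some (pymax (h :: t))
-- M[j][l] for the 4x4 list matrices mat builds (indices come from range(4))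
def getEntry (M : List (List (Option Int))) (j l : Nat) : Option Int :=
  (M.getD j []).getD l none
-- base case: a single row's matrix, r[j] on the diagonal, None elsewhere
def baseMat (r : List Int) : List (List (Option Int)) :=
  (List.range 4).map fun j => (List.range 4).map fun k =>
    if j = k then some (r.getD j 0) else none
-- merge of two adjacent blocks over a change of column (k != kk)
def mergeMat (X Y : List (List (Option Int))) : List (List (Option Int)) :=
  (List.range 4).map fun j => (List.range 4).map fun l =>
    maxD ((List.range 4).flatMap fun k => (List.range 4).filterMap fun kk =>
      if k ≠ kk then oadd (getEntry X j k) (getEntry Y kk l) else none)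

def mat (rows : List (List Int)) : List (List (Option Int)) :=
  if _h : rows.length ≤ 1 then baseMat (rows.headD [])
  else mergeMat (mat (rows.take (rows.length / 2))) (mat (rows.drop (rows.length / 2)))
termination_by rows.length
decreasing_by
  · simp; omega
  · simp; omega

def solution_alt (land : List (List Int)) : Int :=
  pymax ((mat land).flatMap fun row => row.filterMap id)

-- ===== PRECONDITION & SPEC =====
-- Pre_ restricts to grids whose rows all have at least 4 columns (a lone row exactly 4):
-- everywhere else A raises IndexError, except on a single row shorter than 4 (A returns
-- its max, B's 4-column base case raises IndexError) and a single row longer than 4 (A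
-- maxes the whole row while B, built for the problem's 4 columns, uses only the first 4).
def Pre_solution (land : List (List Int)) : Prop :=
  land ≠ [] ∧ (∀ row ∈ land, 4 ≤ row.length) ∧
    (land.length = 1 → (land.getD 0 []).length = 4)
instance (land : List (List Int)) : Decidable (Pre_solution land) := by
  unfold Pre_solution; infer_instance

def pvWitness_solution : List (List Int) := [[1, 2, 3, 4], [4, 3, 2, 1]]

def Spec_solution (land : List (List Int)) (out : Int) : Prop := out = solution_alt land
instance (land : List (List Int)) (out : Int) : Decidable (Spec_solution land out) := by
  unfold Spec_solution; infer_instance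

-- ===== CLAIM (what is proved, stated in full; the proofs are below) =====
def Claim_equal_solution : Prop :=
  ∀ (land : List (List Int)), Dom_solution land → Pre_solution land →
    Spec_solution land (solution land)

-- ===== LEMMAS AND PROOFS =====

-- maximum of a list of Option Int (none = -infinity), the semantic value of maxD
def omax : Option Int → Option Int → Option Int
  | none, b => b
  | some a, none => some a
  | some a, some b => some (max a b)
def omaxL (l : List (Option Int)) : Option Int := l.foldl omax none

-- bestv rows j l = best sum of a path through rows entering at column j, leaving at l
def bestv : List (List Int) → Nat → Nat → Option Int
  | [], _, _ => none
  | [r], j, l => if j = l then some (r.getD j 0) else none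
  | r :: r' :: rs, j, l =>
      oadd (some (r.getD j 0))
        (omaxL ((List.range 4).map fun k => if j = k then none else bestv (r' :: rs) k l))

-- column maximum of bestv: best sum ending at column l, any start
def finalvec (rows : List (List Int)) (l : Nat) : Option Int :=
  omaxL ((List.range 4).map fun j => bestv rows j l)

theorem omax_none_right (a : Option Int) : omax a none = a := by cases a <;> rfl
theorem omax_none_left (a : Option Int) : omax none a = a := rfl
theorem oadd_none_left (a : Option Int) : oadd none a = none := rfl
theorem oadd_none_right (a : Option Int) : oadd a none = none := by cases a <;> rfl
theorem oadd_assoc (a b c : Option Int) : oadd (oadd a b) c = oadd a (oadd b c) := by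
  cases a <;> cases b <;> cases c <;> simp [oadd] <;> omega
theorem oadd_omax_left (a b c : Option Int) :
    oadd a (omax b c) = omax (oadd a b) (oadd a c) := by
  cases a <;> cases b <;> cases c <;> simp [oadd, omax] <;> omega
theorem oadd_omax_right (a b c : Option Int) :
    oadd (omax a b) c = omax (oadd a c) (oadd b c) := by
  cases a <;> cases b <;> cases c <;> simp [oadd, omax] <;> omega
theorem omax_fuse (a b c d : Option Int) :
    omax (omax a b) (omax c d) = omax (omax a c) (omax b d) := by
  cases a <;> cases b <;> cases c <;> cases d <;> simp [omax] <;> omega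

theorem omax_assoc (a b c : Option Int) : omax (omax a b) c = omax a (omax b c) := by
  cases a <;> cases b <;> cases c <;> simp [omax] <;> omega

theorem foldl_omax_acc (l : List (Option Int)) :
    ∀ acc : Option Int, l.foldl omax acc = omax acc (omaxL l) := by
  induction l with
  | nil => intro acc; rw [omaxL]; simp [List.foldl, omax_none_right]
  | cons x t ih =>
    intro acc
    have h1 : omaxL (x :: t) = omax x (omaxL t) := by
      rw [omaxL]
      simp only [List.foldl]
      rw [ih (omax none x), omax_none_left]
    rw [h1, List.foldl_cons, ih (omax acc x), omax_assoc]

theorem omaxL_cons (a : Option Int) (l : List (Option Int)) :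
    omaxL (a :: l) = omax a (omaxL l) := by
  rw [omaxL]
  simp only [List.foldl]
  rw [foldl_omax_acc l (omax none a), omax_none_left]

theorem omaxL_append (l1 l2 : List (Option Int)) :
    omaxL (l1 ++ l2) = omax (omaxL l1) (omaxL l2) := by
  induction l1 with
  | nil => simp [omaxL, omax_none_left]
  | cons a t ih =>
    simp only [List.cons_append, omaxL_cons, ih]
    cases a <;> cases omaxL t <;> cases omaxL l2 <;> simp [omax] <;> omega

theorem omaxL_flatMap {α : Type} (l : List α) (g : α → List (Option Int)) :
    omaxL (l.flatMap g) = omaxL (l.map fun a => omaxL (g a)) := by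
  induction l with
  | nil => rfl
  | cons a t ih => simp only [List.flatMap_cons, List.map_cons, omaxL_append, omaxL_cons, ih]

theorem omaxL_map_none {α : Type} (l : List α) :
    omaxL (l.map fun _ => (none : Option Int)) = none := by
  induction l with
  | nil => rfl
  | cons a t ih => simp only [List.map_cons, omaxL_cons, ih]; rfl

theorem omaxL_map_omax {α : Type} (l : List α) (f g : α → Option Int) :
    omaxL (l.map fun a => omax (f a) (g a)) =
      omax (omaxL (l.map f)) (omaxL (l.map g)) := by
  induction l with
  | nil => rfl
  | cons a t ih => simp only [List.map_cons, omaxL_cons, ih, omax_fuse]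

theorem omaxL_swap {α β : Type} (l1 : List α) (l2 : List β) (g : α → β → Option Int) :
    omaxL (l1.map fun a => omaxL (l2.map (g a))) =
      omaxL (l2.map fun b => omaxL (l1.map fun a => g a b)) := by
  induction l1 with
  | nil => simp only [List.map_nil]; exact (omaxL_map_none l2).symm
  | cons a t ih =>
    simp only [List.map_cons, omaxL_cons]
    rw [ih, omaxL_map_omax]

theorem oadd_omaxL_left (a : Option Int) (l : List (Option Int)) :
    oadd a (omaxL l) = omaxL (l.map (oadd a)) := by
  induction l with
  | nil => simp [omaxL, oadd_none_right]
  | cons x t ih => simp only [List.map_cons, omaxL_cons, oadd_omax_left, ih]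

theorem omaxL_map_oadd_right (l : List (Option Int)) (c : Option Int) :
    omaxL (l.map fun x => oadd x c) = oadd (omaxL l) c := by
  induction l with
  | nil => simp [omaxL, oadd_none_left]
  | cons x t ih => simp only [List.map_cons, omaxL_cons, oadd_omax_right, ih]

theorem ite_none_omaxL {α : Type} (c : Prop) [Decidable c] (l : List α) (g : α → Option Int) :
    (if c then none else omaxL (l.map g)) =
      omaxL (l.map fun a => if c then none else g a) := by
  by_cases h : c
  · rw [if_pos h,
      show (l.map fun a => if c then none else g a) = l.map fun _ => (none : Option Int) from by
        apply List.map_congr_left; intro a _; rw [if_pos h],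
      omaxL_map_none]
  · rw [if_neg h]
    congr 1
    apply List.map_congr_left
    intro a _
    rw [if_neg h]

theorem omaxL_single (l : Nat) (hl : l < 4) (z : Option Int) :
    omaxL ((List.range 4).map fun k => if k = l then z else none) = z := by
  interval_cases l <;> simp [List.range_succ, omaxL_cons, omaxL, omax_none_right, omax_none_left]

theorem pymax_cons (h : Int) (t : List Int) : pymax (h :: t) = t.foldl max h := by
  simp [pymax, PySem.List.max?_id_cons]

theorem foldl_omax_some : ∀ (t : List Int) (a : Int),
    (t.map some).foldl omax (some a) = some (t.foldl max a) := by
  intro t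
  induction t with
  | nil => intro a; rfl
  | cons x s ih =>
    intro a
    simp only [List.map_cons, List.foldl_cons]
    exact ih (max a x)

theorem pymax_some (L : List Int) (h : L ≠ []) : some (pymax L) = omaxL (L.map some) := by
  match L with
  | h0 :: t =>
    rw [pymax_cons]
    exact (foldl_omax_some t h0).symm

theorem omaxL_filterMap {α : Type} (f : α → Option Int) (l : List α) :
    omaxL ((l.filterMap f).map some) = omaxL (l.map f) := by
  induction l with
  | nil => rfl
  | cons a t ih =>
    rw [List.filterMap_cons]
    cases hfa : f a with
    | none => simp only [List.map_cons, omaxL_cons, ih, hfa, omax_none_left]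
    | some b => simp only [List.map_cons, omaxL_cons, ih, hfa]

theorem maxD_eq (L : List Int) : maxD L = omaxL (L.map some) := by
  match L with
  | [] => rfl
  | h :: t => rw [maxD, pymax_some (h :: t) (by simp)]

-- the heart: bestv on an appended block is the max-plus combination of the halves
theorem bestv_append (Y : List (List Int)) (hY : Y ≠ []) :
    ∀ (X : List (List Int)), X ≠ [] → ∀ (j l : Nat), j < 4 →
    bestv (X ++ Y) j l =
      omaxL ((List.range 4).flatMap fun k => (List.range 4).map fun kk =>
        if k ≠ kk then oadd (bestv X j k) (bestv Y kk l) else none) := by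
  intro X
  induction X with
  | nil => intro h; exact absurd rfl h
  | cons r X' ih =>
    intro _ j l hj
    obtain ⟨y, ys, rfl⟩ : ∃ y ys, Y = y :: ys := by
      cases Y with
      | nil => exact absurd rfl hY
      | cons y ys => exact ⟨y, ys, rfl⟩
    cases X' with
    | nil =>
      -- base: X = [r]
      simp only [List.nil_append, List.cons_append]
      rw [show bestv (r :: y :: ys) j l =
            oadd (some (r.getD j 0))
              (omaxL ((List.range 4).map fun k =>
                if j = k then none else bestv (y :: ys) k l)) from rfl]
      rw [omaxL_flatMap]
      have hout : ((List.range 4).map fun k =>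
            omaxL ((List.range 4).map fun kk =>
              if k ≠ kk then oadd (bestv [r] j k) (bestv (y :: ys) kk l) else none)) =
          (List.range 4).map fun k =>
            if k = j then
              omaxL ((List.range 4).map fun kk =>
                if j ≠ kk then oadd (some (r.getD j 0)) (bestv (y :: ys) kk l) else none)
            else none := by
        apply List.map_congr_left
        intro k _
        by_cases hkj : k = j
        · subst hkj
          simp only [if_pos rfl]
          congr 1
          apply List.map_congr_left
          intro kk _
          by_cases hne : k ≠ kk
          · simp [hne, bestv]
          · simp [hne]
        · rw [if_neg hkj]
          rw [show ((List.range 4).map fun kk =>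
                if k ≠ kk then oadd (bestv [r] j k) (bestv (y :: ys) kk l) else none) =
              (List.range 4).map fun _ => (none : Option Int) by
            apply List.map_congr_left
            intro kk _
            have hjk : j ≠ k := fun h => hkj h.symm
            have : bestv [r] j k = none := by simp [bestv, hjk]
            simp [this, oadd_none_left]]
          exact omaxL_map_none _
      rw [hout, omaxL_single j hj, oadd_omaxL_left, List.map_map]
      congr 1
      apply List.map_congr_left
      intro k _
      by_cases hk : j = k
      · simp [hk, oadd_none_right]
      · simp [Function.comp, hk, oadd_none_right]
    | cons r2 X'' =>
      -- step: X = r :: r2 :: X''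
      have hne' : (r2 :: X'' : List (List Int)) ≠ [] := by simp
      simp only [List.cons_append]
      rw [show bestv (r :: r2 :: (X'' ++ (y :: ys))) j l =
            oadd (some (r.getD j 0))
              (omaxL ((List.range 4).map fun k =>
                if j = k then none else bestv (r2 :: (X'' ++ (y :: ys))) k l)) from rfl]
      -- rewrite inner bestv with IH
      have hIH : ((List.range 4).map fun k =>
            if j = k then none else bestv (r2 :: (X'' ++ (y :: ys))) k l) =
          (List.range 4).map fun k =>
            omaxL ((List.range 4).map fun p =>
              omaxL ((List.range 4).map fun q =>
                if j = k then none
                else if p ≠ q then oadd (bestv (r2 :: X'') k p) (bestv (y :: ys) q l)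
                else none)) := by
        apply List.map_congr_left
        intro k hk
        rw [List.mem_range] at hk
        have ih' := ih hne' k l hk
        simp only [List.cons_append] at ih'
        rw [ih', omaxL_flatMap, ite_none_omaxL]
        congr 1
        apply List.map_congr_left
        intro p _
        exact ite_none_omaxL _ _ _
      rw [hIH]
      -- RHS: unfold bestv (r :: r2 :: X'') and rearrange
      rw [omaxL_flatMap]
      have hR : ((List.range 4).map fun p =>
            omaxL ((List.range 4).map fun q =>
              if p ≠ q then oadd (bestv (r :: r2 :: X'') j p) (bestv (y :: ys) q l)
              else none)) =
          (List.range 4).map fun p =>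
            oadd (some (r.getD j 0))
              (omaxL ((List.range 4).map fun q =>
                omaxL ((List.range 4).map fun k =>
                  if j = k then none
                  else if p ≠ q then oadd (bestv (r2 :: X'') k p) (bestv (y :: ys) q l)
                  else none))) := by
        apply List.map_congr_left
        intro p _
        rw [show (((List.range 4).map fun q =>
              if p ≠ q then oadd (bestv (r :: r2 :: X'') j p) (bestv (y :: ys) q l)
              else none)) =
            (List.range 4).map fun q =>
              oadd (some (r.getD j 0))
                (omaxL ((List.range 4).map fun k =>
                  if j = k then none
                  else if p ≠ q then oadd (bestv (r2 :: X'') k p) (bestv (y :: ys) q l)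
                  else none)) from by
          apply List.map_congr_left
          intro q _
          by_cases hpq : p ≠ q
          · simp only [if_pos hpq]
            rw [show bestv (r :: r2 :: X'') j p =
                  oadd (some (r.getD j 0))
                    (omaxL ((List.range 4).map fun k =>
                      if j = k then none else bestv (r2 :: X'') k p)) from rfl]
            rw [oadd_assoc]
            congr 1
            rw [show oadd (omaxL ((List.range 4).map fun k =>
                  if j = k then none else bestv (r2 :: X'') k p)) (bestv (y :: ys) q l) =
                omaxL (((List.range 4).map fun k =>
                  if j = k then none else bestv (r2 :: X'') k p).map
                  (fun x => oadd x (bestv (y :: ys) q l))) from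
              (omaxL_map_oadd_right _ _).symm]
            rw [List.map_map]
            congr 1
            apply List.map_congr_left
            intro k _
            by_cases hjk : j = k
            · simp [hjk, oadd_none_left]
            · simp [hjk, hpq]
          · simp only [if_neg hpq]
            rw [show ((List.range 4).map fun k =>
                  if j = k then (none : Option Int) else none) =
                (List.range 4).map fun _ => (none : Option Int) from by
              apply List.map_congr_left; intro k _; split <;> rfl]
            rw [omaxL_map_none, oadd_none_right]]
        rw [show omaxL ((List.range 4).map fun q =>
              oadd (some (r.getD j 0)) _) =
            oadd (some (r.getD j 0)) (omaxL ((List.range 4).map fun q =>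
              (omaxL ((List.range 4).map fun k =>
                if j = k then none
                else if p ≠ q then oadd (bestv (r2 :: X'') k p) (bestv (y :: ys) q l)
                else none)))) from by
          rw [oadd_omaxL_left, List.map_map]; rfl]
      rw [hR]
      rw [show ((List.range 4).map fun p => oadd (some (r.getD j 0)) _) =
            ((List.range 4).map fun p =>
              (omaxL ((List.range 4).map fun q =>
                omaxL ((List.range 4).map fun k =>
                  if j = k then none
                  else if p ≠ q then oadd (bestv (r2 :: X'') k p) (bestv (y :: ys) q l)
                  else none)))).map (oadd (some (r.getD j 0))) from by
          rw [List.map_map]; rfl]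
      rw [← oadd_omaxL_left]
      congr 1
      -- interchange the k-level with the (p,q)-levels
      rw [omaxL_swap (List.range 4) (List.range 4)
        (fun k p => omaxL ((List.range 4).map fun q =>
          if j = k then none
          else if p ≠ q then oadd (bestv (r2 :: X'') k p) (bestv (y :: ys) q l)
          else none))]
      congr 1
      apply List.map_congr_left
      intro p _
      rw [omaxL_swap (List.range 4) (List.range 4)
        (fun k q => if j = k then none
          else if p ≠ q then oadd (bestv (r2 :: X'') k p) (bestv (y :: ys) q l)
          else none)]

-- appending one row: finalvec evolves exactly like A's stepA recurrence shape
theorem finalvec_append_single (rows : List (List Int)) (hrows : rows ≠ [])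
    (r : List Int) (l : Nat) (hl : l < 4) :
    finalvec (rows ++ [r]) l =
      omaxL ((List.range 4).map fun k =>
        if k = l then none else oadd (finalvec rows k) (some (r.getD l 0))) := by
  unfold finalvec
  have h1 : ((List.range 4).map fun j => bestv (rows ++ [r]) j l) =
      (List.range 4).map fun j =>
        omaxL ((List.range 4).map fun k =>
          if k = l then none else oadd (bestv rows j k) (some (r.getD l 0))) := by
    apply List.map_congr_left
    intro j hjm
    rw [List.mem_range] at hjm
    rw [bestv_append [r] (by simp) rows hrows j l hjm, omaxL_flatMap]
    congr 1
    apply List.map_congr_left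
    intro k _
    rw [show ((List.range 4).map fun kk =>
          if k ≠ kk then oadd (bestv rows j k) (bestv [r] kk l) else none) =
        (List.range 4).map fun kk =>
          if kk = l then (if k = l then none else oadd (bestv rows j k) (some (r.getD l 0)))
          else none from by
      apply List.map_congr_left
      intro kk _
      by_cases hkkl : kk = l
      · subst hkkl
        by_cases hkl : k = kk
        · simp [hkl, bestv]
        · simp [hkl, bestv]
      · have : bestv [r] kk l = none := by simp [bestv, hkkl]
        simp [this, oadd_none_right, hkkl]]
    rw [omaxL_single l hl]
  rw [h1]
  rw [omaxL_swap (List.range 4) (List.range 4)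
    (fun j k => if k = l then none else oadd (bestv rows j k) (some (r.getD l 0)))]
  congr 1
  apply List.map_congr_left
  intro k _
  by_cases hkl : k = l
  · simp only [if_pos hkl]
    exact omaxL_map_none _
  · simp only [if_neg hkl]
    rw [show ((List.range 4).map fun j => oadd (bestv rows j k) (some (r.getD l 0))) =
        ((List.range 4).map fun j => bestv rows j k).map
          (fun x => oadd x (some (r.getD l 0))) from by
      rw [List.map_map]; rfl]
    rw [omaxL_map_oadd_right]

theorem finalvec_single (r : List Int) (l : Nat) (hl : l < 4) :
    finalvec [r] l = some (r.getD l 0) := by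
  unfold finalvec
  rw [show ((List.range 4).map fun j => bestv [r] j l) =
      (List.range 4).map fun j => if j = l then some (r.getD l 0) else none from by
    apply List.map_congr_left
    intro j _
    by_cases hjl : j = l
    · simp [bestv, hjl]
    · simp [bestv, hjl]]
  exact omaxL_single l hl _

-- one stepA matches one appended row
theorem finalvec_step (rows : List (List Int)) (hrows : rows ≠ []) (prev r : List Int)
    (hinv : ∀ k, k < 4 → finalvec rows k = some (prev.getD k 0)) :
    ∀ l, l < 4 → finalvec (rows ++ [r]) l = some ((stepA prev r).getD l 0) := by
  intro l hl
  rw [finalvec_append_single rows hrows r l hl]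
  have hmap : ((List.range 4).map fun k =>
      if k = l then none else oadd (finalvec rows k) (some (r.getD l 0))) =
      (List.range 4).map fun k =>
        if k = l then none else some (prev.getD k 0 + r.getD l 0) := by
    apply List.map_congr_left
    intro k hk
    rw [List.mem_range] at hk
    by_cases hkl : k = l
    · simp [hkl]
    · simp only [if_neg hkl]
      rw [hinv k hk]
      rfl
  rw [hmap]
  have hget : ∀ (i : Nat), i < 4 → rowGet prev (i : Int) = prev.getD i 0 := by
    intro i _
    simp [rowGet, PySem.List.pyGetD_natCast]
  interval_cases l <;>
    simp [List.range_succ, omaxL_cons, omaxL, omax, omax_none_left, omax_none_right,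
      stepA, max3, rowGet, PySem.List.pyGetD_natCast, PySem.List.pyGetD_ofNat',
      List.getD_eq_getElem?_getD] <;> omega

theorem finalvec_fold (rest : List (List Int)) :
    ∀ (rows : List (List Int)) (prev : List Int), rows ≠ [] →
    (∀ k, k < 4 → finalvec rows k = some (prev.getD k 0)) →
    ∀ l, l < 4 →
      finalvec (rows ++ rest) l = some ((rest.foldl (fun p r => stepA p r) prev).getD l 0) := by
  induction rest with
  | nil => intro rows prev _ hinv l hl; simpa using hinv l hl
  | cons r rest' ih =>
    intro rows prev hrows hinv l hl
    have hstep := finalvec_step rows hrows prev r hinv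
    have := ih (rows ++ [r]) (stepA prev r) (by simp) hstep l hl
    simpa [List.append_assoc] using this

theorem stepA_length (prev row : List Int) : (stepA prev row).length = 4 := by
  simp [stepA]

theorem foldl_stepA_length (rest : List (List Int)) :
    ∀ prev, rest ≠ [] → (rest.foldl (fun p r => stepA p r) prev).length = 4 := by
  induction rest with
  | nil => intro _ h; exact absurd rfl h
  | cons r rest' ih =>
    intro prev _
    cases hr : rest' with
    | nil => simp [stepA_length]
    | cons a t =>
      have := ih (stepA prev r) (by simp [hr])
      simpa [hr] using this

-- the table fold of A, read at the last row, is a rolling fold of stepA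
theorem tableFold (land : List (List Int)) (a : Nat) (m : List (List Int))
    (hlen : m.length = land.length) (ha : 1 ≤ a) (hle : a ≤ land.length) :
    PySem.List.pyGetD
      ((PySem.List.pyRange (a : Int) (land.length : Int) 1).foldl
        (fun m i =>
          PySem.List.pySetD m i
            (stepA (PySem.List.pyGetD m (i - 1) []) (PySem.List.pyGetD land i [])))
        m)
      ((land.length : Int) - 1) []
      = (land.drop a).foldl (fun p r => stepA p r) (m.getD (a - 1) []) := by
  induction hn : land.length - a generalizing a m with
  | zero =>
    have haeq : a = land.length := by omega
    subst haeq
    rw [PySem.List.pyRange_one_eq_nil (le_refl _)]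
    have hc : ((land.length : Int) - 1) = ((land.length - 1 : Nat) : Int) := by omega
    simp [hc, List.drop_length]
  | succ n ih =>
    have hlt : a < land.length := by omega
    rw [PySem.List.pyRange_one_cons (by exact_mod_cast hlt)]
    simp only [List.foldl_cons]
    have hc1 : ((a : Int) - 1) = ((a - 1 : Nat) : Int) := by omega
    rw [hc1]
    simp only [PySem.List.pySetD_natCast, PySem.List.pyGetD_natCast]
    have hstep : ((a : Int) + 1) = (((a + 1 : Nat)) : Int) := by omega
    rw [hstep, ih (a + 1) _ (by simp [hlen]) (by omega) (by omega) (by omega)]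
    have hset : (m.set a (stepA (m.getD (a - 1) []) (land.getD a []))).getD (a + 1 - 1) []
        = stepA (m.getD (a - 1) []) (land.getD a []) := by
      simp only [Nat.add_sub_cancel]
      rw [List.getD_eq_getElem?_getD, List.getElem?_set_self (by omega)]
      simp
    rw [hset, List.drop_eq_getElem_cons hlt, List.foldl_cons]
    congr 1
    simp [List.getD_eq_getElem?_getD, List.getElem?_eq_getElem hlt]

theorem solution_eq_fold (land : List (List Int)) (hne : land ≠ []) :
    solution land =
      pymax ((land.drop 1).foldl (fun p r => stepA p r) (land.getD 0 [])) := by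
  have hlen1 : 1 ≤ land.length := by
    cases land with | nil => exact absurd rfl hne | cons x xs => simp
  rw [solution]
  simp only [PySem.List.pyGetD_zero]
  have hm0len : ([land.getD 0 []] ++
      (PySem.List.pyRange 0 ((land.length : Int) - 1) 1).map (fun _ => ([0,0,0,0] : List Int))).length
      = land.length := by
    have hc : ((land.length : Int) - 1) = ((land.length - 1 : Nat) : Int) := by omega
    rw [hc, PySem.List.pyRange_zero_natCast]
    simp; omega
  have ht := tableFold land 1 _ hm0len (le_refl _) hlen1
  push_cast at ht
  rw [ht]
  rfl

-- the matrices mat builds are exactly the bestv tables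
theorem getEntry_mapmap (g : Nat → Nat → Option Int) (j l : Nat) (hj : j < 4) (hl : l < 4) :
    getEntry ((List.range 4).map fun j => (List.range 4).map fun l => g j l) j l = g j l := by
  unfold getEntry
  simp [List.getD_eq_getElem?_getD, List.getElem?_map, List.getElem?_range, hj, hl]

theorem mat_eq : ∀ (n : Nat) (rows : List (List Int)), rows.length = n → rows ≠ [] →
    mat rows = (List.range 4).map fun j => (List.range 4).map fun l => bestv rows j l := by
  intro n
  induction n using Nat.strong_induction_on with
  | _ n ih =>
    intro rows hn hne
    by_cases h1 : rows.length ≤ 1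
    · obtain ⟨r, rfl⟩ : ∃ r, rows = [r] := by
        cases rows with
        | nil => exact absurd rfl hne
        | cons a t =>
          cases t with
          | nil => exact ⟨a, rfl⟩
          | cons b s => simp at h1
      rw [mat]
      simp only [List.length_cons, List.length_nil, if_pos, dif_pos (by simp : ([r] : List (List Int)).length ≤ 1)]
      unfold baseMat
      simp only [List.headD_cons]
      apply List.map_congr_left
      intro j _
      apply List.map_congr_left
      intro k _
      simp [bestv]
    · rw [mat, dif_neg h1]
      have h2 : 2 ≤ rows.length := by omega
      set mid := rows.length / 2 with hmid
      have hmid1 : 1 ≤ mid := by omega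
      have hmidlt : mid < rows.length := by omega
      have hTlen : (rows.take mid).length = mid := by
        rw [List.length_take]; omega
      have hDlen : (rows.drop mid).length = rows.length - mid := by
        rw [List.length_drop]
      have hTne : rows.take mid ≠ [] := by
        intro h; rw [← List.length_eq_zero_iff] at h; omega
      have hDne : rows.drop mid ≠ [] := by
        intro h; rw [← List.length_eq_zero_iff] at h; omega
      rw [ih (rows.take mid).length (by omega) _ rfl hTne,
          ih (rows.drop mid).length (by omega) _ rfl hDne]
      unfold mergeMat
      apply List.map_congr_left
      intro j hj
      rw [List.mem_range] at hj
      apply List.map_congr_left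
      intro l hl
      rw [List.mem_range] at hl
      rw [maxD_eq]
      rw [show (((List.range 4).flatMap fun k => (List.range 4).filterMap fun kk =>
            if k ≠ kk then
              oadd (getEntry ((List.range 4).map fun j => (List.range 4).map fun l =>
                      bestv (rows.take mid) j l) j k)
                   (getEntry ((List.range 4).map fun j => (List.range 4).map fun l =>
                      bestv (rows.drop mid) j l) kk l)
            else none).map some) =
          (List.range 4).flatMap fun k => (((List.range 4).filterMap fun kk =>
            if k ≠ kk then oadd (bestv (rows.take mid) j k) (bestv (rows.drop mid) kk l)
            else none).map some) from by
        rw [List.map_flatMap]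
        apply List.flatMap_congr  -- may not exist; replaced below if needed
        intro k hk
        rw [List.mem_range] at hk
        congr 1
        apply List.filterMap_congr
        intro kk hkk
        rw [List.mem_range] at hkk
        rw [getEntry_mapmap _ j k hj hk, getEntry_mapmap _ kk l hkk hl]]
      rw [omaxL_flatMap]
      rw [show ((List.range 4).map fun k => omaxL (((List.range 4).filterMap fun kk =>
            if k ≠ kk then oadd (bestv (rows.take mid) j k) (bestv (rows.drop mid) kk l)
            else none).map some)) =
          (List.range 4).map fun k => omaxL ((List.range 4).map fun kk =>
            if k ≠ kk then oadd (bestv (rows.take mid) j k) (bestv (rows.drop mid) kk l)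
            else none) from by
        apply List.map_congr_left
        intro k _
        exact omaxL_filterMap _ _]
      rw [← omaxL_flatMap]
      rw [← bestv_append (rows.drop mid) hDne (rows.take mid) hTne j l hj]
      rw [List.take_append_drop]

-- ===== VERDICT (by name: the statement is the Claim_ definition above) =====
theorem solution_spec : Claim_equal_solution := by
  intro land _hdom hpre
  obtain ⟨hne, _hrows, h1len⟩ := hpre
  show solution land = solution_alt land
  obtain ⟨r0, rest, rfl⟩ : ∃ r0 rest, land = r0 :: rest := by
    cases land with
    | nil => exact absurd rfl hne
    | cons a t => exact ⟨a, t, rfl⟩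
  set prevF := (rest.foldl (fun p r => stepA p r) r0) with hprevF
  have hsol : solution (r0 :: rest) = pymax prevF := by
    rw [solution_eq_fold _ hne]; rfl
  have hfin : ∀ l, l < 4 → finalvec (r0 :: rest) l = some (prevF.getD l 0) := by
    intro l hl
    have hbase : ∀ k, k < 4 → finalvec [r0] k = some (r0.getD k 0) :=
      fun k hk => finalvec_single r0 k hk
    have := finalvec_fold rest [r0] r0 (by simp) hbase l hl
    simpa using this
  have hprevlen : prevF.length = 4 := by
    cases hr : rest with
    | nil => simp [hprevF, hr]; have := h1len (by simp [hr]); simpa using this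
    | cons a t =>
      rw [hprevF, hr]
      exact foldl_stepA_length (a :: t) r0 (by simp)
  obtain ⟨p0, p1, p2, p3, hp⟩ : ∃ p0 p1 p2 p3, prevF = [p0, p1, p2, p3] := by
    match prevF, hprevlen with
    | [a, b, c, d], _ => exact ⟨a, b, c, d, rfl⟩
  -- value of B through the omaxL chain
  have hmat := mat_eq (r0 :: rest).length (r0 :: rest) rfl (by simp)
  set L := ((mat (r0 :: rest)).flatMap fun row => row.filterMap id) with hL
  have hE : omaxL (L.map some) = some (pymax prevF) := by
    rw [hL, hmat, List.map_flatMap, omaxL_flatMap, List.map_map]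
    rw [show ((List.range 4).map
          ((fun a => omaxL (List.map some (List.filterMap id a))) ∘
            (fun j => (List.range 4).map fun l => bestv (r0 :: rest) j l))) =
        (List.range 4).map fun j => omaxL ((List.range 4).map fun l => bestv (r0 :: rest) j l) from by
      apply List.map_congr_left
      intro j _
      show omaxL ((((List.range 4).map fun l => bestv (r0 :: rest) j l).filterMap id).map some) = _
      rw [omaxL_filterMap id _, List.map_id]]
    rw [omaxL_swap (List.range 4) (List.range 4) (fun j l => bestv (r0 :: rest) j l)]
    rw [show ((List.range 4).map fun l => omaxL ((List.range 4).map fun j => bestv (r0 :: rest) j l)) =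
        (List.range 4).map fun l => finalvec (r0 :: rest) l from rfl]
    have hconc : (List.range 4).map (fun l => finalvec (r0 :: rest) l) =
        [some (prevF.getD 0 0), some (prevF.getD 1 0), some (prevF.getD 2 0), some (prevF.getD 3 0)] := by
      rw [show List.range 4 = [0, 1, 2, 3] from rfl]
      simp [hfin 0 (by omega), hfin 1 (by omega), hfin 2 (by omega), hfin 3 (by omega)]
    rw [hconc, hp]
    simp [omaxL_cons, omaxL, omax, omax_none_left, omax_none_right, pymax_cons, List.foldl]
  have hLne : L ≠ [] := by
    intro h
    rw [h] at hE
    simp [omaxL, List.foldl] at hE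
  have hB : solution_alt (r0 :: rest) = pymax L := by rw [solution_alt]
  rw [hsol, hB]
  have h2 : some (pymax L) = some (pymax prevF) := (pymax_some L hLne).trans hE
  exact (Option.some.inj h2).symm
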